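-- pv_equiv track=rewrite | github.com/PuffyShoggoth/Competitive | CCC/CCC '05 J5 - Bananas.py | ismonk
-- ===== SOURCE A (Python) =====
-- def ismonk(s, st, ed):
--    if ed<st: return False
--    if ed == st and s[ed]=="A": return True
--    elif ed==st: return False
--    if s[st]=="N" or s[ed]=="N":
--       return False
--    if s[st]=="B":
--       nb = 0
--       for i in range(st+1, ed+1):
--          if s[i]=="B":
--              nb+=1
--          if s[i]=="S":
--             if nb > 0:
--                 nb -=1
--                 continue
--             if i==ed: return ismonk(s, st+1, i-1)
--             elif s[i+1]!="N": return False
--             elif i+1 == ed: return False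
--             return ismonk(s, st+1, i-1) and ismonk(s, i+2, ed)
--       return False
--    elif s[st]=="S":
--       return False
--    else:
--       if s[st+1]=="N":
--          return ismonk(s, st+2, ed)
--       else:
--          return False
-- ===== SOURCE B (Python) =====
-- def ismonk(s, st, ed):
--     pending = [(st, ed)]
--     while pending:
--         a, b = pending.pop()
--         if b < a:
--             return False
--         if a == b:
--             if s[a] != "A":
--                 return False
--             continue
--         if s[a] == "N" or s[b] == "N" or s[a] == "S":
--             return False
--         if s[a] == "B":
--             i = _first_unmatched_s(s, a + 1, b)
--             if i is None:
--                 return False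
--             if i == b:
--                 pending.append((a + 1, i - 1))
--             elif s[i + 1] != "N" or i + 1 == b:
--                 return False
--             else:
--                 pending.append((a + 1, i - 1))
--                 pending.append((i + 2, b))
--         elif s[a + 1] == "N":
--             pending.append((a + 2, b))
--         else:
--             return False
--     return True
--
--
-- def _first_unmatched_s(s, lo, hi):
--     depth = 0
--     for i in range(lo, hi + 1):
--         c = s[i]
--         if c == "S":
--             if depth == 0:
--                 return i
--             depth -= 1
--         elif c == "B":
--             depth += 1
--     return None
-- ===== Notes on version B (the rewrite author's own statement) =====
-- stated objective: alternative
-- what changed: A's recursive descent over (st, ed) ranges is replaced by an iterative parser that maintains an explicit LIFO worklist of pending ranges, popping one range at a time and pushing its one or two sub-ranges instead of recursing; order is irrelevant because every pending range must be valid.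
import Mathlib
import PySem

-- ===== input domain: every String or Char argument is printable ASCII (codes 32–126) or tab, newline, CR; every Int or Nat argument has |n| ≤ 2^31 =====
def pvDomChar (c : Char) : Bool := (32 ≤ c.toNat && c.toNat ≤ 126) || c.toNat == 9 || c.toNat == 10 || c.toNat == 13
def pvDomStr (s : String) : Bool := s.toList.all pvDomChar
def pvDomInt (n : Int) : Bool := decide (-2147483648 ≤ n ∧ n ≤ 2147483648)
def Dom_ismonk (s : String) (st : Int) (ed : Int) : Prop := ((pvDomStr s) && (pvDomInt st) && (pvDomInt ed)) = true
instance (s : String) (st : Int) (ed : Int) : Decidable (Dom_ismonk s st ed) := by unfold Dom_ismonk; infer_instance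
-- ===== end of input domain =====

-- B replaces A's recursion by an explicit LIFO worklist of (start,end) ranges (iterative, no recursion) — objective: alternative decomposition, same asymptotic cost.

-- ===== PORT A =====
theorem pvTo {x y : Int} (h2 : 0 < y) (h1 : x < y) : x.toNat < y.toNat :=
  (Int.toNat_lt_toNat h2).mpr h1

theorem pvdec_scan (ed i : Int) (h : i ≤ ed) :
    (ed + 1 - (i + 1)).toNat < (ed + 1 - i).toNat :=
  pvTo (Int.sub_pos.mpr (Int.lt_add_one_iff.mpr h)) (sub_lt_sub_left (lt_add_one i) (ed + 1))

-- A's for-loop over range(st+1, ed+1) with the nb counter: it either runs off the end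
-- (the loop's final `return False`) or stops at the first 'S' seen with nb == 0 and
-- returns there.  findS_A is that loop, step for step (nb incremented on 'B' first,
-- then the 'S' test, decrement-and-continue when nb' > 0); the decision cascade taken
-- at the stopping index i stays, in A's order, in `ismonk` itself.
def findS_A (s : String) (ed : Int) (i : Int) (nb : Int) : Option Int :=
  if i > ed then none
  else
    let nb' := if PySem.Str.pyGet? s i = some 'B' then nb + 1 else nb
    if PySem.Str.pyGet? s i = some 'S' then
      if nb' > 0 then findS_A s ed (i + 1) (nb' - 1) else some i
    else findS_A s ed (i + 1) nb'
termination_by (ed + 1 - i).toNat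
decreasing_by all_goals exact pvdec_scan ed i (Int.not_lt.mp (by assumption))

theorem pvh1 (ed i : Int) (n : Nat) (h1 : (ed + 1 - i).toNat ≤ n + 1) (h2 : ¬ i > ed) :
    (ed + 1 - (i + 1)).toNat ≤ n :=
  Nat.lt_succ_iff.mp (Nat.lt_of_lt_of_le (pvdec_scan ed i (Int.not_lt.mp h2)) h1)
theorem pvh2 (ed i : Int) (h : (ed + 1 - i).toNat ≤ 0) : i > ed :=
  Int.add_one_le_iff.mp (sub_nonpos.mp (Int.toNat_eq_zero.mp (Nat.le_zero.mp h)))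
theorem pvh3 (ed i j : Int) (h2 : ¬ i > ed) (h : i = j) : i ≤ j ∧ j ≤ ed :=
  ⟨le_of_eq h, h ▸ Int.not_lt.mp h2⟩
theorem pvh4 (ed i j : Int) (h : i + 1 ≤ j ∧ j ≤ ed) : i ≤ j ∧ j ≤ ed :=
  ⟨le_of_lt (Int.add_one_le_iff.mp h.1), h.2⟩

-- termination helper for `ismonk`, cited by its decreasing_by
theorem findS_A_bounds (s : String) (ed : Int) : ∀ (n : Nat) (i nb j : Int),
    (ed + 1 - i).toNat ≤ n → findS_A s ed i nb = some j → i ≤ j ∧ j ≤ ed := by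
  intro n
  induction n with
  | zero =>
    intro i nb j hn h
    rw [findS_A, if_pos (pvh2 ed i hn)] at h
    exact absurd h (by simp)
  | succ n ih =>
    intro i nb j hn h
    by_cases hi : i > ed
    · rw [findS_A, if_pos hi] at h
      exact absurd h (by simp)
    · rw [findS_A, if_neg hi] at h
      by_cases hS : PySem.Str.pyGet? s i = some 'S'
      · simp only [hS] at h
        simp only [show (some 'S' = some 'B') = False by simp, if_false, if_true] at h
        by_cases hpos : nb > 0
        · rw [if_pos hpos] at h
          exact pvh4 ed i j (ih (i + 1) (nb - 1) j (pvh1 ed i n hn hi) h)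
        · rw [if_neg hpos] at h
          exact pvh3 ed i j hi (Option.some.inj h)
      · simp only [hS, if_false] at h
        exact pvh4 ed i j (ih (i + 1) _ j (pvh1 ed i n hn hi) h)

theorem findS_A_bounds' (s : String) (ed i nb j : Int) (h : findS_A s ed i nb = some j) :
    i ≤ j ∧ j ≤ ed :=
  findS_A_bounds s ed (ed + 1 - i).toNat i nb j (le_refl _) h

theorem pvlt (st ed : Int) (h1 : ¬ ed < st) (h2 : ¬ ed = st) : st < ed :=
  (Int.not_lt.mp h1).lt_of_ne (fun h => h2 h.symm)
theorem pvtwo : (0 : Int) < 2 := by norm_num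
theorem pvdec_a (st ed i : Int) (h1 : st + 1 ≤ i) (h2 : i ≤ ed) (h3 : st < ed) :
    (i - 1 - (st + 1)).toNat < (ed - st).toNat :=
  pvTo (Int.sub_pos.mpr h3)
    (lt_of_le_of_lt (sub_le_sub_right (sub_le_sub_right h2 1) (st + 1))
      ((show ed - 1 - (st + 1) = ed - (st + 2) by ring) ▸
        sub_lt_sub_left (lt_add_of_pos_right st pvtwo) ed))
theorem pvdec_b (st ed i : Int) (h1 : st + 1 ≤ i) (h3 : st < ed) :
    (ed - (i + 2)).toNat < (ed - st).toNat :=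
  pvTo (Int.sub_pos.mpr h3)
    (sub_lt_sub_left ((Int.add_one_le_iff.mp h1).trans_le (le_add_of_nonneg_right pvtwo.le)) ed)
theorem pvdec_c (st ed : Int) (h3 : st < ed) :
    (ed - (st + 2)).toNat < (ed - st).toNat :=
  pvTo (Int.sub_pos.mpr h3) (sub_lt_sub_left (lt_add_of_pos_right st pvtwo) ed)

def ismonk (s : String) (st : Int) (ed : Int) : Bool :=
  if ed < st then false
  else if ed = st then decide (PySem.Str.pyGet? s ed = some 'A')
  else if PySem.Str.pyGet? s st = some 'N' ∨ PySem.Str.pyGet? s ed = some 'N' then false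
  else if PySem.Str.pyGet? s st = some 'B' then
    match hfs : findS_A s ed (st + 1) 0 with
    | none => false
    | some i =>
      if i = ed then ismonk s (st + 1) (i - 1)
      else if ¬ (PySem.Str.pyGet? s (i + 1) = some 'N') then false
      else if i + 1 = ed then false
      else ismonk s (st + 1) (i - 1) && ismonk s (i + 2) ed
  else if PySem.Str.pyGet? s st = some 'S' then false
  else if PySem.Str.pyGet? s (st + 1) = some 'N' then ismonk s (st + 2) ed
  else false
termination_by (ed - st).toNat
decreasing_by
  · exact pvdec_a st ed i (findS_A_bounds' s ed (st + 1) 0 i hfs).1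
      (findS_A_bounds' s ed (st + 1) 0 i hfs).2 (pvlt st ed ‹_› ‹_›)
  · exact pvdec_a st ed i (findS_A_bounds' s ed (st + 1) 0 i hfs).1
      (findS_A_bounds' s ed (st + 1) 0 i hfs).2 (pvlt st ed ‹_› ‹_›)
  · exact pvdec_b st ed i (findS_A_bounds' s ed (st + 1) 0 i hfs).1 (pvlt st ed ‹_› ‹_›)
  · exact pvdec_c st ed (pvlt st ed ‹_› ‹_›)

-- ===== PORT B =====
-- Source B's _first_unmatched_s: a depth counter walked over range(lo, hi+1)
def scanB (s : String) (idxs : List Int) (depth : Int) : Option Int :=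
  match idxs with
  | [] => none
  | i :: rest =>
    if PySem.Str.pyGet? s i = some 'S' then
      if depth = 0 then some i else scanB s rest (depth - 1)
    else if PySem.Str.pyGet? s i = some 'B' then scanB s rest (depth + 1)
    else scanB s rest depth

def firstUnmatchedS (s : String) (lo : Int) (hi : Int) : Option Int :=
  scanB s (PySem.List.pyRange lo (hi + 1) 1) 0

-- termination helpers for `loopB`, cited by its decreasing_by
theorem scanB_mem (s : String) : ∀ (idxs : List Int) (d j : Int),
    scanB s idxs d = some j → j ∈ idxs := by
  intro idxs
  induction idxs with
  | nil => intro d j h; simp [scanB] at h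
  | cons i rest ih =>
    intro d j h
    rw [scanB] at h
    split at h
    · split at h
      · simp at h; simp [h]
      · exact List.mem_cons_of_mem _ (ih _ _ h)
    · split at h
      · exact List.mem_cons_of_mem _ (ih _ _ h)
      · exact List.mem_cons_of_mem _ (ih _ _ h)

theorem firstUnmatchedS_bounds (s : String) (lo hi j : Int)
    (h : firstUnmatchedS s lo hi = some j) : lo ≤ j ∧ j ≤ hi := by
  have hm := scanB_mem s _ _ _ h
  rw [PySem.List.mem_pyRange_one] at hm
  omega

def pvStackMeasure (stack : List (Int × Int)) : Nat :=
  stack.foldr (fun p acc => (p.2 - p.1 + 2).toNat + acc) 0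

theorem pvStackMeasure_cons (a b : Int) (rest : List (Int × Int)) :
    pvStackMeasure ((a, b) :: rest) = (b - a + 2).toNat + pvStackMeasure rest := rfl
theorem pvltba (a b : Int) (h1 : ¬ b < a) (h2 : ¬ a = b) : a < b :=
  (Int.not_lt.mp h1).lt_of_ne h2
theorem pvB0 (a b : Int) (r : Nat) (h : ¬ b < a) : r < (b - a + 2).toNat + r :=
  Nat.lt_add_of_pos_left
    (pvTo (add_pos_of_nonneg_of_pos (sub_nonneg.mpr (Int.not_lt.mp h)) pvtwo)
      (add_pos_of_nonneg_of_pos (sub_nonneg.mpr (Int.not_lt.mp h)) pvtwo))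
theorem pvBy (a b : Int) (h3 : a < b) : (0 : Int) < b - a + 2 :=
  add_pos_of_nonneg_of_pos (sub_nonneg.mpr h3.le) pvtwo
theorem pvB1 (a b i : Int) (r : Nat) (h1 : a + 1 ≤ i) (h2 : i ≤ b) (h3 : a < b) :
    (i - 1 - (a + 1) + 2).toNat + r < (b - a + 2).toNat + r :=
  Nat.add_lt_add_right
    (pvTo (pvBy a b h3)
      ((show i - 1 - (a + 1) + 2 = i - a by ring) ▸
        lt_of_le_of_lt (sub_le_sub_right h2 a) (lt_add_of_pos_right (b - a) pvtwo))) r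
theorem pvB2 (a b i : Int) (r : Nat) (h1 : a + 1 ≤ i) (h2 : i ≤ b) (h3 : a < b) :
    (b - (i + 2) + 2).toNat + ((i - 1 - (a + 1) + 2).toNat + r) < (b - a + 2).toNat + r := by
  have e1 : (b - (i + 2) + 2).toNat = (b - i).toNat := by congr 1; ring
  have e2 : (i - 1 - (a + 1) + 2).toNat = (i - a).toNat := by congr 1; ring
  have e3 : (b - i).toNat + (i - a).toNat = (b - a).toNat := by
    rw [← Int.toNat_add (sub_nonneg.mpr h2)
          (sub_nonneg.mpr (Int.add_one_le_iff.mp h1).le)]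
    congr 1; ring
  calc (b - (i + 2) + 2).toNat + ((i - 1 - (a + 1) + 2).toNat + r)
      = ((b - i).toNat + (i - a).toNat) + r := by rw [e1, e2, Nat.add_assoc]
    _ = (b - a).toNat + r := by rw [e3]
    _ < (b - a + 2).toNat + r :=
        Nat.add_lt_add_right (pvTo (pvBy a b h3) (lt_add_of_pos_right (b - a) pvtwo)) r
theorem pvB3 (a b : Int) (r : Nat) (h3 : a < b) :
    (b - (a + 2) + 2).toNat + r < (b - a + 2).toNat + r :=
  Nat.add_lt_add_right
    (pvTo (pvBy a b h3)
      ((show b - (a + 2) + 2 = b - a by ring) ▸ lt_add_of_pos_right (b - a) pvtwo)) r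

-- Source B's while-loop: pop a range off the pending stack (the list head is the top,
-- so Python's append-then-pop order is preserved), check it, push its children.
def loopB (s : String) (stack : List (Int × Int)) : Bool :=
  match stack with
  | [] => true
  | (a, b) :: rest =>
    if b < a then false
    else if a = b then
      if PySem.Str.pyGet? s a = some 'A' then loopB s rest else false
    else if PySem.Str.pyGet? s a = some 'N' ∨ PySem.Str.pyGet? s b = some 'N' ∨
            PySem.Str.pyGet? s a = some 'S' then false
    else if PySem.Str.pyGet? s a = some 'B' then
      match hfs : firstUnmatchedS s (a + 1) b with
      | none => false
      | some i =>
        if i = b then loopB s ((a + 1, i - 1) :: rest)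
        else if ¬ (PySem.Str.pyGet? s (i + 1) = some 'N') ∨ i + 1 = b then false
        else loopB s ((i + 2, b) :: (a + 1, i - 1) :: rest)
    else if PySem.Str.pyGet? s (a + 1) = some 'N' then loopB s ((a + 2, b) :: rest)
    else false
termination_by pvStackMeasure stack
decreasing_by
  · rw [pvStackMeasure_cons]
    exact pvB0 a b (pvStackMeasure rest) ‹_›
  · rw [pvStackMeasure_cons, pvStackMeasure_cons]
    exact pvB1 a b i (pvStackMeasure rest) (firstUnmatchedS_bounds s (a + 1) b i hfs).1
      (firstUnmatchedS_bounds s (a + 1) b i hfs).2 (pvltba a b ‹_› ‹_›)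
  · rw [pvStackMeasure_cons, pvStackMeasure_cons, pvStackMeasure_cons]
    exact pvB2 a b i (pvStackMeasure rest) (firstUnmatchedS_bounds s (a + 1) b i hfs).1
      (firstUnmatchedS_bounds s (a + 1) b i hfs).2 (pvltba a b ‹_› ‹_›)
  · rw [pvStackMeasure_cons, pvStackMeasure_cons]
    exact pvB3 a b (pvStackMeasure rest) (pvltba a b ‹_› ‹_›)

def ismonk_alt (s : String) (st : Int) (ed : Int) : Bool :=
  loopB s [(st, ed)]

-- ===== PRECONDITION & SPEC =====
-- Pre_ admits exactly the inputs on which the Python A returns normally: either the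
-- empty range (no character is touched) or st/ed such that every index A reads is a
-- valid (possibly negative) Python index; outside, A raises IndexError.
def Pre_ismonk (s : String) (st : Int) (ed : Int) : Prop :=
  ed < st ∨ (-(PySem.Str.len s) ≤ st ∧ ed < PySem.Str.len s)
instance (s : String) (st : Int) (ed : Int) : Decidable (Pre_ismonk s st ed) := by
  unfold Pre_ismonk; infer_instance

def pvWitness_ismonk : String × Int × Int := ("BAS", 0, 2)

def Spec_ismonk (s : String) (st : Int) (ed : Int) (out : Bool) : Prop := out = ismonk_alt s st ed
instance (s : String) (st : Int) (ed : Int) (out : Bool) : Decidable (Spec_ismonk s st ed out) := by unfold Spec_ismonk; infer_instance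

-- ===== CLAIM (what is proved, stated in full; the proofs are below) =====
def Claim_equal_ismonk : Prop := ∀ (s : String) (st : Int) (ed : Int), Dom_ismonk s st ed → Pre_ismonk s st ed → Spec_ismonk s st ed (ismonk s st ed)

-- ===== LEMMAS AND PROOFS =====

-- A's scan and B's scan find the same first unmatched 'S'
theorem scan_eq (s : String) (ed : Int) : ∀ (n : Nat) (i nb : Int),
    (ed + 1 - i).toNat ≤ n → 0 ≤ nb →
    findS_A s ed i nb = scanB s (PySem.List.pyRange i (ed + 1) 1) nb := by
  intro n
  induction n with
  | zero =>
    intro i nb hn _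
    have hi : ed < i := by omega
    rw [findS_A, PySem.List.pyRange_one_eq_nil (by omega), scanB]
    simp [show i > ed from hi]
  | succ n ih =>
    intro i nb hn hnb
    by_cases hi : i > ed
    · rw [findS_A, PySem.List.pyRange_one_eq_nil (by omega), scanB]
      simp [hi]
    · rw [findS_A, PySem.List.pyRange_one_cons (by omega), scanB]
      simp only [if_neg hi]
      by_cases hS : PySem.Str.pyGet? s i = some 'S'
      · simp only [hS]
        simp only [show (some 'S' = some 'B') = False by simp, if_false, if_true]
        by_cases h0 : nb = 0
        · simp [h0]
        · have hpos : nb > 0 := by omega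
          rw [if_pos hpos, if_neg h0]
          exact ih (i + 1) (nb - 1) (by omega) (by omega)
      · simp only [hS, if_false]
        by_cases hB : PySem.Str.pyGet? s i = some 'B'
        · simp only [hB, if_true]
          exact ih (i + 1) (nb + 1) (by omega) (by omega)
        · simp only [hB, if_false]
          exact ih (i + 1) nb (by omega) hnb

-- key invariant: the worklist loop is the conjunction of A's verdicts on its ranges
theorem loop_split (s : String) : ∀ (n : Nat) (a b : Int) (rest : List (Int × Int)),
    pvStackMeasure ((a, b) :: rest) ≤ n →
    loopB s ((a, b) :: rest) = (ismonk s a b && loopB s rest) := by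
  intro n
  induction n with
  | zero =>
    intro a b rest hn
    rw [pvStackMeasure_cons] at hn
    have hba : b < a := by omega
    rw [loopB, ismonk]
    simp [hba]
  | succ n ih =>
    intro a b rest hn
    rw [pvStackMeasure_cons] at hn
    rw [loopB, ismonk]
    by_cases hba : b < a
    · simp [hba]
    · by_cases hab : a = b
      · subst hab
        simp only [if_neg hba, if_true]
        by_cases hA : PySem.Str.pyGet? s a = some 'A'
        · rw [if_pos hA, decide_eq_true hA, Bool.true_and]
        · rw [if_neg hA, decide_eq_false hA, Bool.false_and]
      · have hab' : ¬ (b = a) := fun h => hab h.symm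
        have hlt : a < b := by omega
        simp only [if_neg hba, if_neg hab, if_neg hab']
        by_cases hN : PySem.Str.pyGet? s a = some 'N' ∨ PySem.Str.pyGet? s b = some 'N'
        · have hNor : PySem.Str.pyGet? s a = some 'N' ∨ PySem.Str.pyGet? s b = some 'N' ∨
              PySem.Str.pyGet? s a = some 'S' := by tauto
          simp only [if_pos hN, if_pos hNor, Bool.false_and]
        · by_cases hS : PySem.Str.pyGet? s a = some 'S'
          · have hNor : PySem.Str.pyGet? s a = some 'N' ∨ PySem.Str.pyGet? s b = some 'N' ∨
                PySem.Str.pyGet? s a = some 'S' := Or.inr (Or.inr hS)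
            have hB : ¬ (PySem.Str.pyGet? s a = some 'B') := by rw [hS]; simp
            simp only [if_pos hNor, if_neg hN, if_neg hB, if_pos hS, Bool.false_and]
          · have hNor : ¬ (PySem.Str.pyGet? s a = some 'N' ∨ PySem.Str.pyGet? s b = some 'N' ∨
                PySem.Str.pyGet? s a = some 'S') := by tauto
            simp only [if_neg hN, if_neg hNor]
            by_cases hB : PySem.Str.pyGet? s a = some 'B'
            · simp only [if_pos hB]
              have hscan : findS_A s b (a + 1) 0 = firstUnmatchedS s (a + 1) b :=
                scan_eq s b (b + 1 - (a + 1)).toNat (a + 1) 0 (le_refl _) (le_refl 0)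
              rw [hscan]
              cases hfs : firstUnmatchedS s (a + 1) b with
              | none => simp only [Bool.false_and]
              | some i =>
                have hbd := firstUnmatchedS_bounds s (a + 1) b i hfs
                simp only
                by_cases hib : i = b
                · simp only [if_pos hib]
                  rw [ih (a + 1) (i - 1) rest (by rw [pvStackMeasure_cons]; omega)]
                · simp only [if_neg hib]
                  by_cases hiN : PySem.Str.pyGet? s (i + 1) = some 'N'
                  · by_cases hi1 : i + 1 = b
                    · have hor : (¬ (PySem.Str.pyGet? s (i + 1) = some 'N') ∨ i + 1 = b) :=
                        Or.inr hi1
                      simp only [if_pos hor, if_neg (not_not_intro hiN), if_pos hi1, Bool.false_and]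
                    · have hor : ¬ (¬ (PySem.Str.pyGet? s (i + 1) = some 'N') ∨ i + 1 = b) := by
                        tauto
                      simp only [if_neg hor, if_neg (not_not_intro hiN), if_neg hi1]
                      rw [ih (i + 2) b ((a + 1, i - 1) :: rest)
                            (by rw [pvStackMeasure_cons, pvStackMeasure_cons]; omega),
                          ih (a + 1) (i - 1) rest (by rw [pvStackMeasure_cons]; omega)]
                      cases ismonk s (a + 1) (i - 1) <;> cases ismonk s (i + 2) b <;> simp
                  · have hor : (¬ (PySem.Str.pyGet? s (i + 1) = some 'N') ∨ i + 1 = b) := Or.inl hiN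
                    simp only [if_pos hor, if_pos hiN, Bool.false_and]
            · simp only [if_neg hB, if_neg hS]
              by_cases h1 : PySem.Str.pyGet? s (a + 1) = some 'N'
              · simp only [if_pos h1]
                rw [ih (a + 2) b rest (by rw [pvStackMeasure_cons]; omega)]
              · simp only [if_neg h1, Bool.false_and]

-- ===== VERDICT (by name: the statement is the Claim_ definition above) =====
theorem ismonk_spec : Claim_equal_ismonk := by
  unfold Claim_equal_ismonk
  intro s st ed _ _
  unfold Spec_ismonk ismonk_alt
  rw [loop_split s (pvStackMeasure [(st, ed)]) st ed [] (le_refl _)]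
  simp [loopB]
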